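-- pv_equiv track=rewrite | github.com/824zzy/Leetcode | is_connect.py | solution
-- ===== SOURCE A (Python) =====
-- from collections import defaultdict
--
-- def solution(N, A, B):
--     e = defaultdict(dict)
--     for i, j in zip(A, B):
--         e[i][j] = e[j][i] = 1
--
--     def dfs(i):
--         if i == N: return True
--         for j in e[i]:
--             if j == i + 1: return dfs(j)
--         return False
--     return dfs(1)
-- ===== SOURCE B (Python) =====
-- def solution(N, A, B):
--     edges = set(zip(A, B)) | set(zip(B, A))
--     return N >= 1 and all((i, i + 1) in edges for i in range(1, N))
-- ===== Notes on version B (the rewrite author's own statement) =====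
-- stated objective: simpler
-- what changed: Replaced the adjacency defaultdict-of-dicts plus recursive DFS chain-walk by a flat set of directed edge pairs and a single membership pass checking (i, i+1) for i in range(1, N).
import Mathlib
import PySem

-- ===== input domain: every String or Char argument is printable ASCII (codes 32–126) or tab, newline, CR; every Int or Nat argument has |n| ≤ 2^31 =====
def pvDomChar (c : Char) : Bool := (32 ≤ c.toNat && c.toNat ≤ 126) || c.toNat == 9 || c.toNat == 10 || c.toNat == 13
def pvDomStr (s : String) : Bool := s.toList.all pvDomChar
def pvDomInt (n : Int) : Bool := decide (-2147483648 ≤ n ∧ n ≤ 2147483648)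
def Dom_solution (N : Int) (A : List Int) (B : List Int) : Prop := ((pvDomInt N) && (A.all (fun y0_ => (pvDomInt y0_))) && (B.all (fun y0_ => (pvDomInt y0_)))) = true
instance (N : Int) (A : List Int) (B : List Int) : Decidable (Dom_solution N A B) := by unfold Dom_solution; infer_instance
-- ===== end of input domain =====

-- B replaces A's adjacency dict + recursive DFS chain-walk by a set of edge pairs and one
-- membership pass over range(1, N); objective: simpler (same asymptotic cost).

-- ===== PORT A =====
-- e[i][j] = e[j][i] = 1 for (i, j) in zip(A, B): two sequential inner-dict updates per pair
def pvStepE (e : PySem.Dict Int (PySem.Dict Int Int)) (p : Int × Int) :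
    PySem.Dict Int (PySem.Dict Int Int) :=
  let e1 := e.insert p.1 ((e.getD p.1 PySem.Dict.empty).insert p.2 1)
  e1.insert p.2 ((e1.getD p.2 PySem.Dict.empty).insert p.1 1)

def pvBuildE (A B : List Int) : PySem.Dict Int (PySem.Dict Int Int) :=
  (A.zip B).foldl pvStepE PySem.Dict.empty

-- neighbour-key membership of the built dict, needed by dfs's termination argument
theorem pvStepE_mem (e : PySem.Dict Int (PySem.Dict Int Int)) (p : Int × Int) (i j : Int) :
    j ∈ ((pvStepE e p).getD i PySem.Dict.empty).keys ↔
      ((p.1 = i ∧ p.2 = j) ∨ (p.2 = i ∧ p.1 = j)) ∨ j ∈ ((e.getD i PySem.Dict.empty).keys) := by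
  simp only [pvStepE, PySem.Dict.getD_insert]
  split_ifs with h1 h2 h2 <;>
    simp_all [PySem.Dict.mem_keys_insert, eq_comm]

theorem pvBuildE_fold_mem (ps : List (Int × Int)) (e : PySem.Dict Int (PySem.Dict Int Int))
    (i j : Int) :
    j ∈ ((ps.foldl pvStepE e).getD i PySem.Dict.empty).keys ↔
      (∃ p ∈ ps, (p.1 = i ∧ p.2 = j) ∨ (p.2 = i ∧ p.1 = j)) ∨
        j ∈ ((e.getD i PySem.Dict.empty).keys) := by
  induction ps generalizing e with
  | nil => simp
  | cons p t ih =>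
      simp only [List.foldl_cons, ih, pvStepE_mem, List.mem_cons]
      constructor
      · rintro (h | (h | h) | h)
        · obtain ⟨q, hq, hq2⟩ := h; exact Or.inl ⟨q, Or.inr hq, hq2⟩
        · exact Or.inl ⟨p, Or.inl rfl, Or.inl h⟩
        · exact Or.inl ⟨p, Or.inl rfl, Or.inr h⟩
        · exact Or.inr h
      · rintro (⟨q, (rfl | hq), hq2⟩ | h)
        · exact Or.inr (Or.inl hq2)
        · exact Or.inl ⟨q, hq, hq2⟩
        · exact Or.inr (Or.inr h)

theorem pvBuildE_mem (A B : List Int) (i j : Int) :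
    j ∈ ((pvBuildE A B).getD i PySem.Dict.empty).keys ↔
      (i, j) ∈ A.zip B ∨ (j, i) ∈ A.zip B := by
  simp only [pvBuildE, pvBuildE_fold_mem, PySem.Dict.getD_empty, PySem.Dict.keys_empty,
    List.not_mem_nil, or_false]
  constructor
  · rintro ⟨⟨x, y⟩, hp, (⟨rfl, rfl⟩ | ⟨rfl, rfl⟩)⟩
    · exact Or.inl hp
    · exact Or.inr hp
  · rintro (h | h)
    · exact ⟨(i, j), h, Or.inl ⟨rfl, rfl⟩⟩
    · exact ⟨(j, i), h, Or.inr ⟨rfl, rfl⟩⟩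

theorem pvFilter_lt_decrease (l : List Int) (i : Int) (h : (i + 1) ∈ l) :
    (l.filter (fun x => decide (i + 1 < x))).length <
      (l.filter (fun x => decide (i < x))).length := by
  induction l with
  | nil => cases h
  | cons a t ih =>
      rcases List.mem_cons.1 h with rfl | hmem
      · by_cases hrest : (i + 1) ∈ t
        · have := ih hrest
          simp only [List.filter_cons]
          split_ifs <;> simp_all <;> omega
        · have hsub : (t.filter (fun x => decide (i + 1 < x))).length ≤
              (t.filter (fun x => decide (i < x))).length := by
            apply List.Sublist.length_le
            apply List.monotone_filter_right
            intro x hx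
            simp_all; omega
          simp only [List.filter_cons]
          split_ifs <;> simp_all <;> omega
      · have := ih hmem
        simp only [List.filter_cons]
        split_ifs <;> simp_all <;> omega

-- from a found neighbour j = i+1 of i, j occurs in A or B
theorem pvDfs_step_mem (A B : List Int) (i j : Int)
    (h : ((pvBuildE A B).getD i PySem.Dict.empty).keys.find? (fun j => j == i + 1) = some j) :
    j = i + 1 ∧ j ∈ A ++ B := by
  have h1 := List.find?_some h
  have h2 : j ∈ ((pvBuildE A B).getD i PySem.Dict.empty).keys := List.mem_of_find?_eq_some h
  have h3 := (pvBuildE_mem A B i j).1 h2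
  refine ⟨by simpa using h1, ?_⟩
  rcases h3 with h | h
  · exact List.mem_append.2 (Or.inr (List.of_mem_zip h).2)
  · exact List.mem_append.2 (Or.inl (List.of_mem_zip h).1)

def pvDfs (N : Int) (A B : List Int) (i : Int) : Bool :=
  if i == N then true
  else
    match hf : ((pvBuildE A B).getD i PySem.Dict.empty).keys.find? (fun j => j == i + 1) with
    | some j => pvDfs N A B j
    | none => false
termination_by ((A ++ B).filter (fun x => decide (i < x))).length
decreasing_by
  obtain ⟨rfl, hmem⟩ := pvDfs_step_mem A B i j hf
  exact pvFilter_lt_decrease (A ++ B) i hmem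

def solution (N : Int) (A : List Int) (B : List Int) : Bool :=
  pvDfs N A B 1

-- ===== PORT B =====
def solution_alt (N : Int) (A : List Int) (B : List Int) : Bool :=
  let edges := PySem.Set.union (PySem.Set.ofList (A.zip B)) (PySem.Set.ofList (B.zip A))
  decide (N ≥ 1) && (PySem.List.pyRange 1 N 1).all (fun i => PySem.Set.contains edges (i, i + 1))

-- ===== PRECONDITION & SPEC =====
def Spec_solution (N : Int) (A : List Int) (B : List Int) (out : Bool) : Prop := out = solution_alt N A B
instance (N : Int) (A : List Int) (B : List Int) (out : Bool) : Decidable (Spec_solution N A B out) := by unfold Spec_solution; infer_instance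

-- ===== CLAIM (what is proved, stated in full; the proofs are below) =====
def Claim_equal_solution : Prop := ∀ (N : Int) (A : List Int) (B : List Int), Dom_solution N A B → Spec_solution N A B (solution N A B)

-- ===== LEMMAS AND PROOFS =====

-- characterisation of A's dfs: it succeeds iff i ≤ N and every consecutive edge from i to N exists
theorem pvDfs_eq (N : Int) (A B : List Int) (i : Int) :
    pvDfs N A B i =
      (decide (i ≤ N) &&
        decide (∀ k, i ≤ k → k < N → (k, k + 1) ∈ A.zip B ∨ (k + 1, k) ∈ A.zip B)) := by
  induction i using pvDfs.induct (N := N) (A := A) (B := B) with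
  | case1 i hiN =>
      have hiN' : i = N := by simpa using hiN
      subst hiN'
      rw [pvDfs]
      simp; omega
  | case2 i hiN j hf ih =>
      have hiN' : ¬ i = N := by simpa using hiN
      obtain ⟨rfl, _⟩ := pvDfs_step_mem A B i j hf
      have hPi : (i, i + 1) ∈ A.zip B ∨ (i + 1, i) ∈ A.zip B := by
        have h2 := List.mem_of_find?_eq_some hf
        exact (pvBuildE_mem A B i (i + 1)).1 h2
      rw [pvDfs, if_neg hiN, hf]
      show pvDfs N A B (i + 1) = _
      rw [ih]
      by_cases hle : i + 1 ≤ N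
      · have h2 : i ≤ N := by omega
        simp only [hle, h2, decide_true, Bool.true_and]
        congr 1
        apply propext
        constructor
        · intro h k hk1 hk2
          rcases eq_or_lt_of_le hk1 with rfl | hk
          · exact hPi
          · exact h k (by omega) hk2
        · intro h k hk1 hk2
          exact h k (by omega) hk2
      · have hnot : ¬ (i ≤ N) := by omega
        simp [hle, hnot]
  | case3 i hiN hf =>
      have hiN' : ¬ i = N := by simpa using hiN
      rw [pvDfs, if_neg hiN, hf]
      show false = _
      by_cases hle : i ≤ N
      · have hlt : i < N := by omega
        have hfn := List.find?_eq_none.1 hf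
        have : ¬ ((i, i + 1) ∈ A.zip B ∨ (i + 1, i) ∈ A.zip B) := by
          intro hP
          have : (i + 1) ∈ ((pvBuildE A B).getD i PySem.Dict.empty).keys :=
            (pvBuildE_mem A B i (i + 1)).2 hP
          exact absurd (by simp : ((i + 1 : Int) == i + 1) = true) (by simpa using hfn _ this)
        simp only [Bool.false_eq, Bool.and_eq_false_iff, decide_eq_false_iff_not]
        right
        intro hall
        exact this (hall i le_rfl hlt)
      · simp [hle]

theorem pv_zip_swap_mem (A B : List Int) (x y : Int) :
    (x, y) ∈ B.zip A ↔ (y, x) ∈ A.zip B := by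
  rw [← List.zip_swap A B]
  constructor
  · intro h
    rcases List.mem_map.1 h with ⟨⟨a, b⟩, hm, he⟩
    obtain ⟨rfl, rfl⟩ : b = x ∧ a = y := by simpa [Prod.ext_iff, and_comm] using he
    exact hm
  · intro h
    exact List.mem_map.2 ⟨(y, x), h, rfl⟩

-- ===== VERDICT (by name: the statement is the Claim_ definition above) =====
theorem solution_spec : Claim_equal_solution := by
  intro N A B _
  unfold Spec_solution solution solution_alt
  rw [pvDfs_eq]
  simp only [PySem.Set.contains_eq_listContains]
  have h1 : (decide (1 ≤ N)) = (decide (N ≥ 1)) := by simp [ge_iff_le]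
  rw [h1]
  by_cases hN : N ≥ 1
  case neg => simp [hN]
  case pos =>
    simp only [hN, decide_true, Bool.true_and]
    rw [Bool.eq_iff_iff]
    simp only [decide_eq_true_eq, List.all_eq_true, PySem.List.mem_pyRange_one]
    constructor
    · rintro hall i ⟨hi1, hi2⟩
      rcases hall i hi1 hi2 with hm | hm
      · simp [PySem.Set.mem_union, PySem.Set.mem_ofList, hm]
      · simp [PySem.Set.mem_union, PySem.Set.mem_ofList, (pv_zip_swap_mem A B i (i+1)).2 hm]
    · intro hall k hk1 hk2
      have := hall k ⟨hk1, hk2⟩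
      simp only [PySem.Set.mem_union, PySem.Set.mem_ofList, List.contains_iff_mem] at this
      rcases this with hm | hm
      · exact Or.inl hm
      · exact Or.inr ((pv_zip_swap_mem A B k (k+1)).1 hm)
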